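-- pv_equiv track=rewrite | github.com/Bodzisz/ScriptingLanguagesLab | lab01/ex07.py | firstDot
-- ===== SOURCE A (Python) =====
-- def firstDot(text):
--     words = text.split()
--     result = []
--     for word in words:
--         if word == "OCaml":
--             result = []
--         else:
--             result.append(word)
--     return result
-- ===== SOURCE B (Python) =====
-- def firstDot(text):
--     words = text.split()
--     if "OCaml" in words:
--         idx = len(words) - 1 - words[::-1].index("OCaml")
--         return words[idx + 1:]
--     return words
-- ===== Notes on version B (the rewrite author's own statement) =====
-- stated objective: simpler
-- what changed: Instead of looping over all words while resetting an accumulator at each occurrence of the target token, B locates the last occurrence once (reverse index) and returns the slice after it, or all words when the token is absent.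
import Mathlib
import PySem

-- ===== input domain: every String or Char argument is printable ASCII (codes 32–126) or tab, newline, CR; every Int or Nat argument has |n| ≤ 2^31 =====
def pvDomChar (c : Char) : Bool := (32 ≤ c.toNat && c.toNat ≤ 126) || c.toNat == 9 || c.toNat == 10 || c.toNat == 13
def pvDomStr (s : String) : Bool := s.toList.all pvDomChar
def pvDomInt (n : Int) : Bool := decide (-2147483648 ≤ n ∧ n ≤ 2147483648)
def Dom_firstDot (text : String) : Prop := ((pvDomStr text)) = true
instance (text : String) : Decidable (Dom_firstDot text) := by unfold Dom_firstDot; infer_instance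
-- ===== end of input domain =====

-- B finds the last "OCaml" once and slices after it, instead of A's accumulator reset loop; return values proved equal on all inputs.


-- ===== PORT A =====
def firstDot (text : String) : List String :=
  let words := PySem.Str.split₀ text
  words.foldl (fun result word => if word == "OCaml" then [] else result ++ [word]) []

-- ===== PORT B =====
def firstDot_alt (text : String) : List String :=
  let words := PySem.Str.split₀ text
  if "OCaml" ∈ words then
    match PySem.List.index? words.reverse "OCaml" with
    | some k =>
        let idx : Int := (words.length : Int) - 1 - (k : Int)
        PySem.List.slice words (some (idx + 1)) none
    | none => []   -- unreachable: the guard ensures .index finds a match (Python would raise here)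
  else words

-- ===== PRECONDITION & SPEC =====
def Spec_firstDot (text : String) (out : List String) : Prop := out = firstDot_alt text
instance (text : String) (out : List String) : Decidable (Spec_firstDot text out) := by unfold Spec_firstDot; infer_instance

-- ===== CLAIM (what is proved, stated in full; the proofs are below) =====
def Claim_equal_firstDot : Prop := ∀ (text : String), Dom_firstDot text → Spec_firstDot text (firstDot text)

-- ===== LEMMAS AND PROOFS =====

def pvFoldA (l : List String) : List String :=
  l.foldl (fun result word => if word == "OCaml" then [] else result ++ [word]) []

def pvAltW (l : List String) : List String :=
  if "OCaml" ∈ l then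
    match PySem.List.index? l.reverse "OCaml" with
    | some k => PySem.List.slice l (some (((l.length : Int) - 1 - (k : Int)) + 1)) none
    | none => []
  else l

theorem pvFoldA_append (l : List String) (w : String) :
    pvFoldA (l ++ [w]) = if w == "OCaml" then [] else pvFoldA l ++ [w] := by
  simp [pvFoldA, List.foldl_append]

theorem pv_main (l : List String) : pvFoldA l = pvAltW l := by
  induction l using List.reverseRecOn with
  | nil => simp [pvFoldA, pvAltW]
  | append_singleton l w ih =>
    rw [pvFoldA_append]
    by_cases hw : w = "OCaml"
    · subst hw
      have hidx : PySem.List.index? (l ++ ["OCaml"]).reverse "OCaml" = some 0 := by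
        simp only [List.reverse_append, List.reverse_singleton, List.singleton_append]
        exact PySem.List.index?_cons_self _ _
      simp only [pvAltW, hidx]
      have hmem : "OCaml" ∈ l ++ ["OCaml"] := by simp
      rw [if_pos hmem]
      have : ((((l ++ ["OCaml"]).length : Int) - 1 - ((0 : Nat) : Int)) + 1) = ((l ++ ["OCaml"]).length : Int) := by
        push_cast; ring
      rw [this, PySem.List.slice_from_natCast]
      simp
    · have hw' : ¬ "OCaml" = w := fun h => hw h.symm
      rw [if_neg (by simp [hw])]
      rw [ih]
      by_cases hm : "OCaml" ∈ l
      · -- last "OCaml" is inside l; both sides drop the same prefix then keep w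
        obtain ⟨k, hk⟩ : ∃ k, PySem.List.index? l.reverse "OCaml" = some k := by
          have : "OCaml" ∈ l.reverse := by simpa using hm
          rcases Option.isSome_iff_exists.mp ((PySem.List.index?_isSome_iff _ _).mpr this) with ⟨k, hk⟩
          exact ⟨k, hk⟩
        have hklt : k < l.length := by
          obtain ⟨hlt, -, -⟩ := PySem.List.getElem_of_index?_eq_some hk
          simpa using hlt
        have hidx : PySem.List.index? (l ++ [w]).reverse "OCaml" = some (k + 1) := by
          rw [List.reverse_append]
          simp only [List.reverse_singleton, List.singleton_append]
          rw [PySem.List.index?_cons_of_ne _ hw, hk]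
          rfl
        simp only [pvAltW, hk, hidx]
        rw [if_pos hm, if_pos (List.mem_append_left _ hm)]
        have e1 : (((l.length : Int) - 1 - (k : Int)) + 1) = ((l.length - k : Nat) : Int) := by
          push_cast [Nat.cast_sub hklt.le]; ring
        have e2 : ((((l ++ [w]).length : Int) - 1 - ((k + 1 : Nat) : Int)) + 1) = ((l.length - k : Nat) : Int) := by
          push_cast [Nat.cast_sub hklt.le]; simp; ring
        rw [e1, e2, PySem.List.slice_from_natCast, PySem.List.slice_from_natCast,
          List.drop_append_of_le_length (by omega)]
      · -- no "OCaml" in l: A kept everything, B returns the full list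
        have hm' : ¬ "OCaml" ∈ l ++ [w] := by simp [hm, hw']
        simp only [pvAltW, if_neg hm, if_neg hm']

-- ===== VERDICT (by name: the statement is the Claim_ definition above) =====
theorem firstDot_spec : Claim_equal_firstDot := by
  intro text _
  unfold Spec_firstDot firstDot firstDot_alt
  exact pv_main (PySem.Str.split₀ text)
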